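-- pv_equiv track=rewrite | github.com/Fuhii/algorithmic-problem | main.py | checkAndMarkRow
-- ===== SOURCE A (Python) =====
-- from enum import Enum
--
-- class State(Enum):
--   BLANK = 0
--   WHITE = 1
--   BlACK = 2
--   PUTBLACK = 3
--   BOARDROW = 8
--
-- def checkAndMarkRow(board):
--   # ある配列の要素が２である時それよりあとの要素に１が続いておりその後０が現れた場所を３に置き換える処理
--   n = len(board)
--   for j in range(n):
--       if board[j] == State.BlACK.value:
--         currentIndex = j
--         while currentIndex != n-1 and board[currentIndex+1] == State.WHITE.value:
--             currentIndex += 1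
--         if currentIndex != n-1 and currentIndex != j:
--           board[currentIndex+1] = State.PUTBLACK.value
--   # 配列を逆順にして同様にして３に置き換える処理
--   for h in range(n):
--     if board[h] == State.BlACK.value:
--       currentIndexReverse = h
--       while currentIndexReverse != 0 and board[currentIndexReverse-1] == State.WHITE.value:
--         currentIndexReverse -= 1
--       if currentIndexReverse != 0 and currentIndexReverse != h:
--         board[currentIndexReverse-1] = State.PUTBLACK.value
--   return board
-- ===== SOURCE B (Python) =====
-- def checkAndMarkRow(board):
--     n = len(board)
--     # forward sweep: running state instead of inner while-scan
--     sawBlack, white = False, 0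
--     for i in range(n):
--         v = board[i]
--         if v == 1:
--             if sawBlack:
--                 white += 1
--         elif v == 2:
--             if sawBlack and white >= 1:
--                 board[i] = 3          # destroyed black: does not start a run
--                 sawBlack, white = False, 0
--             else:
--                 sawBlack, white = True, 0
--         else:
--             if sawBlack and white >= 1:
--                 board[i] = 3
--             sawBlack, white = False, 0
--     # reverse sweep (mirror), but a marked black still starts a new run
--     sawBlack, white = False, 0
--     for i in range(n - 1, -1, -1):
--         v = board[i]
--         if v == 1:
--             if sawBlack:
--                 white += 1
--         elif v == 2:
--             if sawBlack and white >= 1: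
--                 board[i] = 3
--             sawBlack, white = True, 0
--         else:
--             if sawBlack and white >= 1:
--                 board[i] = 3
--             sawBlack, white = False, 0
--     return board
-- ===== Notes on version B (the rewrite author's own statement) =====
-- stated objective: faster
-- what changed: Replaces A's per-black inner while-scans (restarting over each white run in both directions) by two single sweeps carrying a (sawBlack, whiteCount) running state that marks terminators on the fly.
import Mathlib
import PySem

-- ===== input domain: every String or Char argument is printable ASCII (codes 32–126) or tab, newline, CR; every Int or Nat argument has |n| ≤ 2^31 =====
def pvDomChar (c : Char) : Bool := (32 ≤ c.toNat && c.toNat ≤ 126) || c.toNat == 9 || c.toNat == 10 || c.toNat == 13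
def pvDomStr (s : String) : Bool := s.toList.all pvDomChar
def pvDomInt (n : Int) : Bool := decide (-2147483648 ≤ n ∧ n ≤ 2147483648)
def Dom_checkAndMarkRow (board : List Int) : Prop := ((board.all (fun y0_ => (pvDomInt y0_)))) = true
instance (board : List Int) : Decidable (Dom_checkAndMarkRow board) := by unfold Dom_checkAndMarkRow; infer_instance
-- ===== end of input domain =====

-- B replaces A's nested index-scans (inner while loops restarting at each black) by two single
-- sweeps carrying a (sawBlack, whiteCount) state; equivalence is about the returned list (both
-- Pythons mutate the argument list in place in the same way).

-- ===== PORT A =====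
-- Python: `while currentIndex != n-1 and board[currentIndex+1] == WHITE: currentIndex += 1`
-- (fuel-bounded transliteration; fuel n is always enough). Indices are always in range in A,
-- so `board[i]` is ported as `getD i 0` exactly.
def pyWhileF : Nat → List Int → Nat → Nat → Nat
  | 0, _, _, c => c
  | fuel + 1, b, n, c =>
      if c ≠ n - 1 ∧ b.getD (c + 1) 0 = 1 then pyWhileF fuel b n (c + 1) else c

-- Python: `while currentIndexReverse != 0 and board[currentIndexReverse-1] == WHITE: …`
def pyWhileR : Nat → List Int → Nat → Nat
  | 0, _, c => c
  | fuel + 1, b, c =>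
      if c ≠ 0 ∧ b.getD (c - 1) 0 = 1 then pyWhileR fuel b (c - 1) else c

def stepAF (n : Nat) (b : List Int) (j : Nat) : List Int :=
  if b.getD j 0 = 2 then
    let c := pyWhileF n b n j
    if c ≠ n - 1 ∧ c ≠ j then b.set (c + 1) 3 else b
  else b

def stepAR (n : Nat) (b : List Int) (h : Nat) : List Int :=
  if b.getD h 0 = 2 then
    let c := pyWhileR n b h
    if c ≠ 0 ∧ c ≠ h then b.set (c - 1) 3 else b
  else b

def checkAndMarkRow (board : List Int) : List Int :=
  let n := board.length
  let b1 := (List.range n).foldl (stepAF n) board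
  (List.range n).foldl (stepAR n) b1

-- ===== PORT B =====
-- forward sweep step (Python Source B, first loop body)
def stepBF (st : List Int × Bool × Nat) (i : Nat) : List Int × Bool × Nat :=
  let b := st.1; let saw := st.2.1; let w := st.2.2
  let v := b.getD i 0
  if v = 1 then (b, saw, if saw then w + 1 else w)
  else if v = 2 then
    if saw = true ∧ 1 ≤ w then (b.set i 3, false, 0) else (b, true, 0)
  else
    (if saw = true ∧ 1 ≤ w then b.set i 3 else b, false, 0)

-- reverse sweep step (Python Source B, second loop body)
def stepBR (st : List Int × Bool × Nat) (i : Nat) : List Int × Bool × Nat :=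
  let b := st.1; let saw := st.2.1; let w := st.2.2
  let v := b.getD i 0
  if v = 1 then (b, saw, if saw then w + 1 else w)
  else if v = 2 then
    (if saw = true ∧ 1 ≤ w then b.set i 3 else b, true, 0)
  else
    (if saw = true ∧ 1 ≤ w then b.set i 3 else b, false, 0)

def checkAndMarkRow_alt (board : List Int) : List Int :=
  let n := board.length
  let b1 := ((List.range n).foldl stepBF (board, false, 0)).1
  (((List.range n).reverse).foldl stepBR (b1, false, 0)).1

-- ===== PRECONDITION & SPEC =====
def Spec_checkAndMarkRow (board : List Int) (out : List Int) : Prop := out = checkAndMarkRow_alt board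
instance (board : List Int) (out : List Int) : Decidable (Spec_checkAndMarkRow board out) := by unfold Spec_checkAndMarkRow; infer_instance

-- ===== CLAIM (what is proved, stated in full; the proofs are below) =====
def Claim_equal_checkAndMarkRow : Prop := ∀ (board : List Int), Dom_checkAndMarkRow board → Spec_checkAndMarkRow board (checkAndMarkRow board)

-- ===== LEMMAS AND PROOFS =====

-- length of the run of consecutive 1-cells starting at index j
def onesLen (b : List Int) (j : Nat) : Nat :=
  if h : j < b.length ∧ b.getD j 0 = 1 then onesLen b (j + 1) + 1 else 0
  termination_by b.length - j
  decreasing_by omega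

-- length of the run of consecutive 1-cells at indices h-1, h-2, …
def revOnesLen (b : List Int) (h : Nat) : Nat :=
  if h' : h ≠ 0 ∧ b.getD (h - 1) 0 = 1 then revOnesLen b (h - 1) + 1 else 0
  termination_by h

-- position p receives a reverse-pass mark (closed form; reducible so the ite below is decidable)
abbrev markP (b : List Int) (p : Nat) : Prop :=
  b.getD p 0 ≠ 1 ∧ b.getD (p + 1) 0 = 1 ∧ b.getD (p + 1 + onesLen b (p + 1)) 0 = 2

-- board after the reverse marks whose source black lies below h (A's traversal order)
def marksSrc (b : List Int) (h : Nat) : List Int :=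
  b.mapIdx (fun p v => if markP b p ∧ p + 1 + onesLen b (p + 1) < h then 3 else v)

-- board after the reverse marks at positions ≥ c (B's traversal order)
def marksPos (b : List Int) (c : Nat) : List Int :=
  b.mapIdx (fun p v => if markP b p ∧ c ≤ p then 3 else v)

theorem getD_lt (b : List Int) (i : Nat) (h : b.getD i 0 ≠ 0) : i < b.length := by
  by_contra hc
  rw [List.getD_eq_default _ _ (by omega)] at h
  exact h rfl

theorem getD_set_self (l : List Int) (i : Nat) (v : Int) (h : i < l.length) :
    (l.set i v).getD i 0 = v := by
  rw [List.getD_eq_getElem _ _ (by simpa using h)]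
  simp

theorem getD_set_ne (l : List Int) (i j : Nat) (v : Int) (h : i ≠ j) :
    (l.set i v).getD j 0 = l.getD j 0 := by
  by_cases hj : j < l.length
  · rw [List.getD_eq_getElem _ _ (by simpa using hj), List.getD_eq_getElem _ _ hj]
    simp [h]
  · rw [List.getD_eq_default _ _ (by simpa using (by omega : l.length ≤ j)),
        List.getD_eq_default _ _ (by omega)]

theorem mapIdx_getD (f : Nat → Int → Int) (b : List Int) (p : Nat) (hp : p < b.length) :
    (b.mapIdx f).getD p 0 = f p (b.getD p 0) := by
  rw [List.getD_eq_getElem _ _ (by simpa using hp), List.getD_eq_getElem _ _ hp]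
  simp

theorem onesLen_zero (b : List Int) (j : Nat) (h : ¬ (j < b.length ∧ b.getD j 0 = 1)) :
    onesLen b j = 0 := by rw [onesLen, dif_neg h]

theorem onesLen_succ (b : List Int) (j : Nat) (h1 : j < b.length) (h2 : b.getD j 0 = 1) :
    onesLen b j = onesLen b (j + 1) + 1 := by rw [onesLen, dif_pos ⟨h1, h2⟩]

theorem onesLen_le (b : List Int) (j : Nat) : onesLen b j ≤ b.length - j := by
  fun_induction onesLen b j with
  | case1 j h ih => omega
  | case2 j h => omega

theorem onesLen_ones (b : List Int) : ∀ j i, i < onesLen b j → b.getD (j + i) 0 = 1 := by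
  intro j
  fun_induction onesLen b j with
  | case1 j h ih =>
      intro i hi
      rcases Nat.eq_zero_or_pos i with h0 | h0
      · subst h0; simpa using h.2
      · have := ih (i - 1) (by omega)
        have e : j + 1 + (i - 1) = j + i := by omega
        rwa [e] at this
  | case2 j h => intro i hi; omega

theorem onesLen_of_run (b : List Int) : ∀ (r j : Nat),
    (∀ i, i < r → b.getD (j + i) 0 = 1) → b.getD (j + r) 0 ≠ 1 → onesLen b j = r := by
  intro r
  induction r with
  | zero => intro j _ hstop; exact onesLen_zero b j (fun hc => hstop (by simpa using hc.2))
  | succ r ih =>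
      intro j hrun hstop
      have h1 : b.getD j 0 = 1 := by simpa using hrun 0 (by omega)
      have hj : j < b.length := getD_lt b j (by rw [h1]; decide)
      rw [onesLen_succ b j hj h1]
      have : onesLen b (j + 1) = r := by
        apply ih
        · intro i hi
          have := hrun (i + 1) (by omega)
          have e : j + (i + 1) = j + 1 + i := by omega
          rwa [e] at this
        · have e : j + 1 + r = j + (r + 1) := by omega
          rwa [e]
      omega

theorem revOnesLen_zero (b : List Int) (h : Nat) (hg : ¬ (h ≠ 0 ∧ b.getD (h - 1) 0 = 1)) :
    revOnesLen b h = 0 := by rw [revOnesLen, dif_neg hg]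

theorem revOnesLen_succ (b : List Int) (h : Nat) (h1 : h ≠ 0) (h2 : b.getD (h - 1) 0 = 1) :
    revOnesLen b h = revOnesLen b (h - 1) + 1 := by rw [revOnesLen, dif_pos ⟨h1, h2⟩]

theorem revOnesLen_le (b : List Int) (h : Nat) : revOnesLen b h ≤ h := by
  fun_induction revOnesLen b h with
  | case1 h hg ih => omega
  | case2 h hg => omega

theorem revOnesLen_ones (b : List Int) :
    ∀ h i, h - revOnesLen b h ≤ i → i < h → b.getD i 0 = 1 := by
  intro h
  fun_induction revOnesLen b h with
  | case1 h hg ih =>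
      intro i hlo hhi
      rcases Nat.lt_or_ge i (h - 1) with hc | hc
      · exact ih i (by omega) hc
      · have : i = h - 1 := by omega
        subst this; exact hg.2
  | case2 h hg =>
      intro i hlo hhi
      omega

theorem revOnesLen_stop (b : List Int) :
    ∀ h, h - revOnesLen b h ≠ 0 → b.getD (h - revOnesLen b h - 1) 0 ≠ 1 := by
  intro h
  fun_induction revOnesLen b h with
  | case1 h hg ih =>
      intro hne
      have e : h - (revOnesLen b (h - 1) + 1) = (h - 1) - revOnesLen b (h - 1) := by omega
      rw [e] at hne ⊢
      exact ih hne
  | case2 h hg =>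
      intro hne
      have hh : h ≠ 0 := by omega
      simp only [Nat.sub_zero]
      intro hc
      exact hg ⟨hh, hc⟩

theorem revOnesLen_congr (b1 b2 : List Int)
    (hiff : ∀ p, b1.getD p 0 = 1 ↔ b2.getD p 0 = 1) :
    ∀ h, revOnesLen b1 h = revOnesLen b2 h := by
  intro h
  induction h using Nat.strong_induction_on with
  | _ h ih =>
    by_cases hg : h ≠ 0 ∧ b1.getD (h - 1) 0 = 1
    · rw [revOnesLen_succ b1 h hg.1 hg.2,
          revOnesLen_succ b2 h hg.1 ((hiff (h - 1)).mp hg.2),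
          ih (h - 1) (by omega)]
    · rw [revOnesLen_zero b1 h hg]
      rw [revOnesLen_zero b2 h (fun hc => hg ⟨hc.1, (hiff (h - 1)).mpr hc.2⟩)]

theorem pyWhileF_spec (b : List Int) : ∀ fuel j, onesLen b (j + 1) ≤ fuel → j < b.length →
    pyWhileF fuel b b.length j = j + onesLen b (j + 1) := by
  intro fuel
  induction fuel with
  | zero => intro j hf hj; interval_cases h : onesLen b (j + 1); simp [pyWhileF]
  | succ fuel ih =>
      intro j hf hj
      by_cases hc : j ≠ b.length - 1 ∧ b.getD (j + 1) 0 = 1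
      · have hlt : j + 1 < b.length := by omega
        rw [onesLen_succ b (j + 1) hlt hc.2] at hf ⊢
        simp only [pyWhileF, if_pos hc]
        rw [ih (j + 1) (by omega) hlt]
        omega
      · simp only [pyWhileF, if_neg hc]
        have : onesLen b (j + 1) = 0 := by
          apply onesLen_zero
          intro hcc
          exact hc ⟨by omega, hcc.2⟩
        omega

theorem pyWhileR_spec (b : List Int) : ∀ fuel h, revOnesLen b h ≤ fuel →
    pyWhileR fuel b h = h - revOnesLen b h := by
  intro fuel
  induction fuel with
  | zero =>
      intro h hf
      interval_cases hr : revOnesLen b h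
      simp [pyWhileR]
  | succ fuel ih =>
      intro h hf
      by_cases hc : h ≠ 0 ∧ b.getD (h - 1) 0 = 1
      · rw [revOnesLen_succ b h hc.1 hc.2] at hf ⊢
        simp only [pyWhileR, if_pos hc]
        rw [ih (h - 1) (by omega)]
        have := revOnesLen_le b (h - 1)
        omega
      · simp only [pyWhileR, if_neg hc]
        rw [revOnesLen_zero b h hc]
        omega

theorem foldBF_len : ∀ (l : List Nat) (st : List Int × Bool × Nat),
    ((l.foldl stepBF st).1).length = st.1.length := by
  intro l
  induction l with
  | nil => intro st; rfl
  | cons i t ih =>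
      intro st
      rw [List.foldl_cons, ih]
      obtain ⟨b, saw, w⟩ := st
      simp only [stepBF]
      split_ifs <;> simp

theorem stepAF_skip (n : Nat) (b : List Int) (j : Nat) (h : b.getD j 0 ≠ 2) :
    stepAF n b j = b := by unfold stepAF; rw [if_neg h]

theorem stepAF_black (n : Nat) (b : List Int) (j : Nat) (h : b.getD j 0 = 2) :
    stepAF n b j = (if pyWhileF n b n j ≠ n - 1 ∧ pyWhileF n b n j ≠ j
      then b.set (pyWhileF n b n j + 1) 3 else b) := by unfold stepAF; rw [if_pos h]

theorem stepBF_one (b : List Int) (saw : Bool) (w i : Nat) (h : b.getD i 0 = 1) :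
    stepBF (b, saw, w) i = (b, saw, if saw = true then w + 1 else w) := by
  simp only [stepBF]; rw [if_pos h]

theorem stepBF_two (b : List Int) (saw : Bool) (w i : Nat) (h : b.getD i 0 = 2) :
    stepBF (b, saw, w) i =
      if saw = true ∧ 1 ≤ w then (b.set i 3, false, 0) else (b, true, 0) := by
  simp only [stepBF]; rw [if_neg (by rw [h]; decide), if_pos h]

theorem stepBF_other (b : List Int) (saw : Bool) (w i : Nat)
    (h1 : b.getD i 0 ≠ 1) (h2 : b.getD i 0 ≠ 2) :
    stepBF (b, saw, w) i =
      (if saw = true ∧ 1 ≤ w then b.set i 3 else b, false, 0) := by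
  simp only [stepBF]; rw [if_neg h1, if_neg h2]

theorem stepBR_one (b : List Int) (saw : Bool) (w i : Nat) (h : b.getD i 0 = 1) :
    stepBR (b, saw, w) i = (b, saw, if saw = true then w + 1 else w) := by
  simp only [stepBR]; rw [if_pos h]

theorem stepBR_two (b : List Int) (saw : Bool) (w i : Nat) (h : b.getD i 0 = 2) :
    stepBR (b, saw, w) i =
      (if saw = true ∧ 1 ≤ w then b.set i 3 else b, true, 0) := by
  simp only [stepBR]; rw [if_neg (by rw [h]; decide), if_pos h]

theorem stepBR_other (b : List Int) (saw : Bool) (w i : Nat)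
    (h1 : b.getD i 0 ≠ 1) (h2 : b.getD i 0 ≠ 2) :
    stepBR (b, saw, w) i =
      (if saw = true ∧ 1 ≤ w then b.set i 3 else b, false, 0) := by
  simp only [stepBR]; rw [if_neg h1, if_neg h2]

theorem fwd_sim (n : Nat) : ∀ (m j : Nat) (bA bB : List Int) (saw : Bool) (w : Nat),
    bB.length = n → bA.length = n → j + m = n →
    (if saw = true ∧ 1 ≤ w + onesLen bB j ∧ j + onesLen bB j < n
       then bA = bB.set (j + onesLen bB j) 3 else bA = bB) →
    (List.range' j m).foldl (stepAF n) bA =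
      ((List.range' j m).foldl stepBF (bB, saw, w)).1 := by
  intro m
  induction m with
  | zero =>
      intro j bA bB saw w hB hA hm hinv
      have hk : onesLen bB j = 0 := onesLen_zero _ _ (by omega)
      rw [hk, if_neg (by omega)] at hinv
      simpa [List.range'] using hinv
  | succ m ih =>
      intro j bA bB saw w hB hA hm hinv
      have hj : j < n := by omega
      simp only [List.range'_succ, List.foldl_cons]
      by_cases hv1 : bB.getD j 0 = 1
      · -- white cell
        have hjl : j < bB.length := getD_lt bB j (by rw [hv1]; decide)
        have hks : onesLen bB j = onesLen bB (j + 1) + 1 := onesLen_succ _ _ hjl hv1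
        by_cases hsaw : saw = true
        · subst hsaw
          by_cases hlt : j + onesLen bB j < n
          · rw [if_pos ⟨rfl, by omega, hlt⟩] at hinv
            have hAj : bA.getD j 0 = 1 := by
              rw [hinv, getD_set_ne _ _ _ _ (by omega), hv1]
            rw [stepAF_skip n bA j (by rw [hAj]; decide), stepBF_one bB true w j hv1]
            simp only [reduceIte]
            apply ih (j + 1) bA bB true (w + 1) hB hA (by omega)
            rw [if_pos ⟨rfl, by omega, by omega⟩]
            have e : j + 1 + onesLen bB (j + 1) = j + onesLen bB j := by omega
            rw [e]
            simpa using hinv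
          · rw [if_neg (by intro hc; exact hlt hc.2.2)] at hinv
            rw [hinv]
            rw [stepAF_skip n bB j (by rw [hv1]; decide), stepBF_one bB true w j hv1]
            simp only [reduceIte]
            apply ih (j + 1) bB bB true (w + 1) hB (hinv ▸ hA) (by omega)
            rw [if_neg (by intro hc; exact hlt (by omega))]
        · have hsf : saw = false := by cases saw <;> simp_all
          subst hsf
          rw [if_neg (by simp)] at hinv
          rw [hinv]
          rw [stepAF_skip n bB j (by rw [hv1]; decide), stepBF_one bB false w j hv1]
          apply ih (j + 1) bB bB false _ hB (hinv ▸ hA) (by omega)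
          rw [if_neg (by simp)]
      · have hk0 : onesLen bB j = 0 :=
          onesLen_zero _ _ (fun hc => hv1 hc.2)
        rw [hk0] at hinv
        by_cases hv2 : bB.getD j 0 = 2
        · -- black cell
          by_cases hmark : saw = true ∧ 1 ≤ w
          · rw [if_pos ⟨hmark.1, by omega, by omega⟩] at hinv
            simp only [Nat.add_zero] at hinv
            have hAj : bA.getD j 0 = 3 := by
              rw [hinv, getD_set_self bB j 3 (by omega)]
            rw [stepAF_skip n bA j (by rw [hAj]; decide), stepBF_two bB saw w j hv2,
                if_pos hmark]
            apply ih (j + 1) bA (bB.set j 3) false 0 (by simp [hB]) hA (by omega)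
            rw [if_neg (by simp)]
            exact hinv
          · rw [if_neg (by intro hc; exact hmark ⟨hc.1, by omega⟩)] at hinv
            rw [hinv]
            rw [stepBF_two bB saw w j hv2, if_neg hmark, stepAF_black n bB j hv2]
            -- (initial board is bB on both sides now)
            have hwf : pyWhileF n bB n j = j + onesLen bB (j + 1) := by
              have h1 : onesLen bB (j + 1) ≤ n := by
                have := onesLen_le bB (j + 1); omega
              have := pyWhileF_spec bB n j h1 (by omega)
              rwa [hB] at this
            rw [hwf]
            have hle : j + 1 + onesLen bB (j + 1) ≤ n := by
              have := onesLen_le bB (j + 1); omega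
            by_cases hbr : j + onesLen bB (j + 1) ≠ n - 1 ∧ j + onesLen bB (j + 1) ≠ j
            · rw [if_pos hbr]
              apply ih (j + 1) (bB.set (j + onesLen bB (j + 1) + 1) 3) bB true 0 hB
                (by simp [hB]) (by omega)
              rw [if_pos ⟨rfl, by omega, by omega⟩]
              have e : j + 1 + onesLen bB (j + 1) = j + onesLen bB (j + 1) + 1 := by omega
              rw [e]
            · rw [if_neg hbr]
              apply ih (j + 1) bB bB true 0 hB hB (by omega)
              rw [if_neg (by intro hc; exact hbr ⟨by omega, by omega⟩)]
        · -- other cell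
          by_cases hmark : saw = true ∧ 1 ≤ w
          · rw [if_pos ⟨hmark.1, by omega, by omega⟩] at hinv
            simp only [Nat.add_zero] at hinv
            have hAj : bA.getD j 0 = 3 := by
              rw [hinv, getD_set_self bB j 3 (by omega)]
            rw [stepAF_skip n bA j (by rw [hAj]; decide),
                stepBF_other bB saw w j hv1 hv2, if_pos hmark]
            apply ih (j + 1) bA (bB.set j 3) false 0 (by simp [hB]) hA (by omega)
            rw [if_neg (by simp)]
            exact hinv
          · rw [if_neg (by intro hc; exact hmark ⟨hc.1, by omega⟩)] at hinv
            rw [hinv]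
            rw [stepAF_skip n bB j hv2, stepBF_other bB saw w j hv1 hv2, if_neg hmark]
            apply ih (j + 1) bB bB false 0 hB hB (by omega)
            rw [if_neg (by simp)]

theorem stepAR_skip (n : Nat) (b : List Int) (h : Nat) (hne : b.getD h 0 ≠ 2) :
    stepAR n b h = b := by unfold stepAR; rw [if_neg hne]

theorem stepAR_black (n : Nat) (b : List Int) (h : Nat) (h2 : b.getD h 0 = 2) :
    stepAR n b h = (if pyWhileR n b h ≠ 0 ∧ pyWhileR n b h ≠ h
      then b.set (pyWhileR n b h - 1) 3 else b) := by unfold stepAR; rw [if_pos h2]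

theorem pvIteCongr {p q : Prop} [Decidable p] [Decidable q] (h : p ↔ q) (a b : Int) :
    (if p then a else b) = (if q then a else b) := by
  by_cases hp : p
  · rw [if_pos hp, if_pos (h.mp hp)]
  · rw [if_neg hp, if_neg (fun hq => hp (h.mpr hq))]

theorem marksSrc_getD_of_not (b : List Int) (c p : Nat)
    (h : ¬ (markP b p ∧ p + 1 + onesLen b (p + 1) < c)) :
    (marksSrc b c).getD p 0 = b.getD p 0 := by
  by_cases hp : p < b.length
  · rw [marksSrc, mapIdx_getD _ _ _ hp, if_neg h]
  · rw [List.getD_eq_default _ _ (by simp [marksSrc]; omega),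
        List.getD_eq_default _ _ (by omega)]

theorem marksSrc_ones (b : List Int) (c : Nat) :
    ∀ p, (marksSrc b c).getD p 0 = 1 ↔ b.getD p 0 = 1 := by
  intro p
  by_cases hp : p < b.length
  · rw [marksSrc, mapIdx_getD _ _ _ hp]
    split_ifs with hc
    · constructor
      · intro h3; exact absurd h3 (by decide)
      · intro h1; exact absurd h1 hc.1.1
    · exact Iff.rfl
  · rw [List.getD_eq_default _ _ (by simp [marksSrc]; omega),
        List.getD_eq_default _ _ (by omega)]

theorem marksPos_getD_lt (b : List Int) (c p : Nat) (h : p < c) :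
    (marksPos b c).getD p 0 = b.getD p 0 := by
  by_cases hp : p < b.length
  · rw [marksPos, mapIdx_getD _ _ _ hp, if_neg (by rintro ⟨-, hle⟩; omega)]
  · rw [List.getD_eq_default _ _ (by simp [marksPos]; omega),
        List.getD_eq_default _ _ (by omega)]

theorem marksPos_step_no (b : List Int) (c : Nat) (h : ¬ markP b c) :
    marksPos b (c + 1) = marksPos b c := by
  apply List.ext_getElem (by simp [marksPos])
  intro p h1 h2
  simp only [marksPos, List.getElem_mapIdx]
  refine pvIteCongr ?_ _ _
  constructor
  · rintro ⟨hm, hle⟩; exact ⟨hm, by omega⟩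
  · rintro ⟨hm, hle⟩
    refine ⟨hm, ?_⟩
    rcases Nat.eq_or_lt_of_le hle with he | hl
    · exfalso; rw [← he] at hm; exact h hm
    · omega

theorem marksPos_step_yes (b : List Int) (c : Nat) (hm : markP b c) :
    (marksPos b (c + 1)).set c 3 = marksPos b c := by
  apply List.ext_getElem (by simp [marksPos])
  intro p h1 h2
  rw [List.getElem_set]
  by_cases hpc : c = p
  · subst hpc
    rw [if_pos rfl]
    simp only [marksPos, List.getElem_mapIdx]
    rw [if_pos ⟨hm, le_refl c⟩]
  · rw [if_neg hpc]
    simp only [marksPos, List.getElem_mapIdx]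
    refine pvIteCongr ?_ _ _
    constructor
    · rintro ⟨hm2, hle⟩; exact ⟨hm2, by omega⟩
    · rintro ⟨hm2, hle⟩; exact ⟨hm2, by omega⟩

theorem revOnesLen_of_run (b : List Int) : ∀ (r h : Nat), r ≤ h →
    (∀ i, h - r ≤ i → i < h → b.getD i 0 = 1) →
    (h - r = 0 ∨ b.getD (h - r - 1) 0 ≠ 1) → revOnesLen b h = r := by
  intro r
  induction r with
  | zero =>
      intro h _ _ hstop
      apply revOnesLen_zero
      rintro ⟨h0, h1⟩
      rcases hstop with hs | hs
      · omega
      · simp only [Nat.sub_zero] at hs; exact hs h1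
  | succ r ih =>
      intro h hrh hones hstop
      have hh : h ≠ 0 := by omega
      have h1 : b.getD (h - 1) 0 = 1 := hones (h - 1) (by omega) (by omega)
      rw [revOnesLen_succ b h hh h1]
      have hr : revOnesLen b (h - 1) = r := by
        apply ih (h - 1) (by omega)
        · intro i hlo hhi; exact hones i (by omega) (by omega)
        · rcases hstop with hs | hs
          · left; omega
          · by_cases h0 : h - 1 - r = 0
            · exact Or.inl h0
            · right
              have e : h - 1 - r - 1 = h - (r + 1) - 1 := by omega
              rw [e]; exact hs
      omega

theorem markP_src_unique (b : List Int) (h p : Nat) (hb2 : b.getD h 0 = 2) (hm : markP b p)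
    (hsrc : p + 1 + onesLen b (p + 1) = h) :
    revOnesLen b h = onesLen b (p + 1) ∧ 1 ≤ onesLen b (p + 1) ∧
      p = h - onesLen b (p + 1) - 1 := by
  have hk1 : 1 ≤ onesLen b (p + 1) := by
    rcases Nat.eq_zero_or_pos (onesLen b (p + 1)) with h0 | h0
    · exfalso
      have h21 := hm.2.1
      rw [(by omega : p + 1 = h)] at h21
      omega
    · exact h0
  have hrev : revOnesLen b h = onesLen b (p + 1) := by
    apply revOnesLen_of_run b (onesLen b (p + 1)) h (by omega)
    · intro i hlo hhi
      have := onesLen_ones b (p + 1) (i - (p + 1)) (by omega)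
      rwa [(by omega : p + 1 + (i - (p + 1)) = i)] at this
    · right
      rw [(by omega : h - onesLen b (p + 1) - 1 = p)]
      exact hm.1
  exact ⟨hrev, hk1, by omega⟩

theorem markP_of_rev (b : List Int) (h : Nat) (hb2 : b.getD h 0 = 2)
    (hr1 : 1 ≤ revOnesLen b h) (hne : h - revOnesLen b h ≠ 0) :
    markP b (h - revOnesLen b h - 1) ∧
      (h - revOnesLen b h - 1) + 1 + onesLen b ((h - revOnesLen b h - 1) + 1) = h := by
  have hrle : revOnesLen b h ≤ h := revOnesLen_le b h
  have e1 : h - revOnesLen b h - 1 + 1 = h - revOnesLen b h := by omega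
  have hones : onesLen b (h - revOnesLen b h) = revOnesLen b h := by
    apply onesLen_of_run
    · intro i hi
      exact revOnesLen_ones b h (h - revOnesLen b h + i) (by omega) (by omega)
    · rw [(by omega : h - revOnesLen b h + revOnesLen b h = h), hb2]; decide
  refine ⟨⟨revOnesLen_stop b h hne, ?_, ?_⟩, ?_⟩
  · rw [e1]
    exact revOnesLen_ones b h (h - revOnesLen b h) (by omega) (by omega)
  · rw [e1, hones, (by omega : h - revOnesLen b h + revOnesLen b h = h)]
    exact hb2
  · rw [e1, hones]; omega

theorem revA_sim (n : Nat) : ∀ (m h : Nat) (b' : List Int), b'.length = n → h + m = n →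
    (List.range' h m).foldl (stepAR n) (marksSrc b' h) = marksSrc b' n := by
  intro m
  induction m with
  | zero =>
      intro h b' hlen hm
      have : h = n := by omega
      subst this
      simp [List.range']
  | succ m ih =>
      intro h b' hlen hm
      have hh : h < n := by omega
      simp only [List.range'_succ, List.foldl_cons]
      have hMh : (marksSrc b' h).getD h 0 = b'.getD h 0 :=
        marksSrc_getD_of_not b' h h (by rintro ⟨-, hlt⟩; omega)
      by_cases hb2 : b'.getD h 0 = 2
      · rw [stepAR_black n _ h (by rw [hMh]; exact hb2)]
        have hrw : revOnesLen (marksSrc b' h) h = revOnesLen b' h :=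
          revOnesLen_congr _ _ (marksSrc_ones b' h) h
        have hwr : pyWhileR n (marksSrc b' h) h = h - revOnesLen b' h := by
          rw [pyWhileR_spec _ n h
              (by have := revOnesLen_le (marksSrc b' h) h; omega), hrw]
        rw [hwr]
        by_cases hbr : h - revOnesLen b' h ≠ 0 ∧ h - revOnesLen b' h ≠ h
        · obtain ⟨hne0, hneh⟩ := hbr
          rw [if_pos ⟨hne0, hneh⟩]
          have hr1 : 1 ≤ revOnesLen b' h := by
            rcases Nat.eq_zero_or_pos (revOnesLen b' h) with h0 | h0
            · exfalso; exact hneh (by omega)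
            · exact h0
          obtain ⟨hmk, hsrc⟩ := markP_of_rev b' h hb2 hr1 hne0
          have e1 : h - revOnesLen b' h - 1 + 1 = h - revOnesLen b' h := by omega
          have hupd : (marksSrc b' h).set (h - revOnesLen b' h - 1) 3 = marksSrc b' (h + 1) := by
            apply List.ext_getElem (by simp [marksSrc])
            intro p hp1 hp2
            rw [List.getElem_set]
            by_cases hpc : h - revOnesLen b' h - 1 = p
            · subst hpc
              rw [if_pos rfl]
              simp only [marksSrc, List.getElem_mapIdx]
              rw [if_pos ⟨hmk, by omega⟩]
            · rw [if_neg hpc]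
              simp only [marksSrc, List.getElem_mapIdx]
              refine pvIteCongr ?_ _ _
              constructor
              · rintro ⟨hm2, hlt⟩; exact ⟨hm2, by omega⟩
              · rintro ⟨hm2, hlt⟩
                refine ⟨hm2, ?_⟩
                rcases Nat.lt_or_ge (p + 1 + onesLen b' (p + 1)) h with hc | hc
                · exact hc
                · exfalso
                  have hsp : p + 1 + onesLen b' (p + 1) = h := by omega
                  obtain ⟨hu1, hu2, hu3⟩ := markP_src_unique b' h p hb2 hm2 hsp
                  exact hpc (by omega)
          rw [hupd]
          exact ih (h + 1) b' hlen (by omega)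
        · rw [if_neg hbr]
          have hnm : marksSrc b' h = marksSrc b' (h + 1) := by
            apply List.ext_getElem (by simp [marksSrc])
            intro p hp1 hp2
            simp only [marksSrc, List.getElem_mapIdx]
            refine pvIteCongr ?_ _ _
            constructor
            · rintro ⟨hm2, hlt⟩; exact ⟨hm2, by omega⟩
            · rintro ⟨hm2, hlt⟩
              refine ⟨hm2, ?_⟩
              rcases Nat.lt_or_ge (p + 1 + onesLen b' (p + 1)) h with hc | hc
              · exact hc
              · exfalso
                have hsp : p + 1 + onesLen b' (p + 1) = h := by omega
                obtain ⟨hu1, hu2, hu3⟩ := markP_src_unique b' h p hb2 hm2 hsp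
                exact hbr ⟨by omega, by omega⟩
          rw [hnm]
          exact ih (h + 1) b' hlen (by omega)
      · rw [stepAR_skip n _ h (by rw [hMh]; exact hb2)]
        have hnm : marksSrc b' h = marksSrc b' (h + 1) := by
          apply List.ext_getElem (by simp [marksSrc])
          intro p hp1 hp2
          simp only [marksSrc, List.getElem_mapIdx]
          refine pvIteCongr ?_ _ _
          constructor
          · rintro ⟨hm2, hlt⟩; exact ⟨hm2, by omega⟩
          · rintro ⟨hm2, hlt⟩
            refine ⟨hm2, ?_⟩
            rcases Nat.lt_or_ge (p + 1 + onesLen b' (p + 1)) h with hc | hc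
            · exact hc
            · exfalso
              apply hb2
              rw [← (by omega : p + 1 + onesLen b' (p + 1) = h)]
              exact hm2.2.2
        rw [hnm]
        exact ih (h + 1) b' hlen (by omega)

theorem revB_sim (b' : List Int) : ∀ (c : Nat) (saw : Bool) (w : Nat),
    c ≤ b'.length →
    (saw = true ↔ b'.getD (c + onesLen b' c) 0 = 2) →
    (saw = true → w = onesLen b' c) →
    (((List.range c).reverse).foldl stepBR (marksPos b' c, saw, w)).1 = marksPos b' 0 := by
  intro c
  induction c with
  | zero => intro saw w _ _ _; simp
  | succ c ih =>
      intro saw w hcle hsiff hw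
      have hrev : (List.range (c + 1)).reverse = c :: (List.range c).reverse := by
        rw [List.range_succ, List.reverse_append]; rfl
      rw [hrev, List.foldl_cons]
      have hcl : c < b'.length := by omega
      have hvc : (marksPos b' (c + 1)).getD c 0 = b'.getD c 0 :=
        marksPos_getD_lt b' (c + 1) c (by omega)
      by_cases hv1 : b'.getD c 0 = 1
      · have hnm : ¬ markP b' c := fun hmk => hmk.1 hv1
        rw [stepBR_one _ saw w c (by rw [hvc]; exact hv1), marksPos_step_no b' c hnm]
        have hks : onesLen b' c = onesLen b' (c + 1) + 1 := onesLen_succ b' c hcl hv1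
        apply ih saw (if saw = true then w + 1 else w) (by omega)
        · rw [(by omega : c + onesLen b' c = (c + 1) + onesLen b' (c + 1))]
          exact hsiff
        · intro hs; rw [if_pos hs, hks, hw hs]
      · have hk0 : onesLen b' c = 0 := onesLen_zero _ _ (fun hcc => hv1 hcc.2)
        have hkiff : (1 ≤ onesLen b' (c + 1)) ↔ b'.getD (c + 1) 0 = 1 := by
          constructor
          · intro h1
            have := onesLen_ones b' (c + 1) 0 (by omega)
            simpa using this
          · intro h1
            have hl1 : c + 1 < b'.length := getD_lt b' (c + 1) (by rw [h1]; decide)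
            rw [onesLen_succ b' (c + 1) hl1 h1]; omega
        have hmkiff : (saw = true ∧ 1 ≤ w) ↔ markP b' c := by
          constructor
          · rintro ⟨hs, hw1⟩
            refine ⟨hv1, ?_, hsiff.mp hs⟩
            rw [hw hs] at hw1
            exact hkiff.mp hw1
          · rintro ⟨h1, h2, h3⟩
            have hs : saw = true := hsiff.mpr h3
            exact ⟨hs, by rw [hw hs]; exact hkiff.mpr h2⟩
        have hbd : (if saw = true ∧ 1 ≤ w then (marksPos b' (c + 1)).set c 3
            else marksPos b' (c + 1)) = marksPos b' c := by
          by_cases hmk : markP b' c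
          · rw [if_pos (hmkiff.mpr hmk), marksPos_step_yes b' c hmk]
          · rw [if_neg (fun hx => hmk (hmkiff.mp hx)), marksPos_step_no b' c hmk]
        by_cases hv2 : b'.getD c 0 = 2
        · rw [stepBR_two _ saw w c (by rw [hvc]; exact hv2), hbd]
          apply ih true 0 (by omega)
          · rw [hk0]; simpa using hv2
          · intro _; rw [hk0]
        · rw [stepBR_other _ saw w c (by rw [hvc]; exact hv1) (by rw [hvc]; exact hv2), hbd]
          apply ih false 0 (by omega)
          · rw [hk0]; simpa using hv2
          · intro hcon; exact absurd hcon (by decide)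

theorem markP_src_lt (b : List Int) (p : Nat) (h : markP b p) :
    p + 1 + onesLen b (p + 1) < b.length := by
  exact getD_lt b _ (by rw [h.2.2]; decide)

theorem marks_final (b' : List Int) : marksSrc b' b'.length = marksPos b' 0 := by
  apply List.ext_getElem (by simp [marksSrc, marksPos])
  intro p h1 h2
  simp only [marksSrc, marksPos, List.getElem_mapIdx]
  have hp : p < b'.length := by simpa [marksSrc] using h1
  by_cases hm : markP b' p
  · rw [if_pos ⟨hm, markP_src_lt b' p hm⟩, if_pos ⟨hm, Nat.zero_le p⟩]
  · rw [if_neg (fun hc => hm hc.1), if_neg (fun hc => hm hc.1)]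

-- ===== VERDICT (by name: the statement is the Claim_ definition above) =====
theorem checkAndMarkRow_spec : Claim_equal_checkAndMarkRow := by
  unfold Claim_equal_checkAndMarkRow
  intro board _
  unfold Spec_checkAndMarkRow
  simp only [checkAndMarkRow, checkAndMarkRow_alt]
  have hf : (List.range board.length).foldl (stepAF board.length) board =
      ((List.range board.length).foldl stepBF (board, false, 0)).1 := by
    rw [List.range_eq_range']
    exact fwd_sim board.length board.length 0 board board false 0 rfl rfl (by omega)
      (by rw [if_neg (by rintro ⟨h1, -, -⟩; exact absurd h1 (by decide))])
  rw [hf]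
  set b1 := ((List.range board.length).foldl stepBF (board, false, 0)).1 with hb1
  have hlen1 : b1.length = board.length := by rw [hb1, foldBF_len]
  have h0 : marksSrc b1 0 = b1 := by
    apply List.ext_getElem (by simp [marksSrc])
    intro p h1 h2
    simp only [marksSrc, List.getElem_mapIdx]
    rw [if_neg (by rintro ⟨-, hlt⟩; omega)]
  have hpn : marksPos b1 board.length = b1 := by
    apply List.ext_getElem (by simp [marksPos])
    intro p h1 h2
    simp only [marksPos, List.getElem_mapIdx]
    rw [if_neg (by rintro ⟨-, hle⟩; simp [marksPos] at h1; omega)]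
  have hA : (List.range board.length).foldl (stepAR board.length) b1 = marksSrc b1 board.length := by
    conv_lhs => rw [show b1 = marksSrc b1 0 from h0.symm]
    rw [List.range_eq_range']
    exact revA_sim board.length board.length 0 b1 hlen1 (by omega)
  have hB : ((List.range board.length).reverse.foldl stepBR (b1, false, 0)).1 =
      marksPos b1 0 := by
    conv_lhs => rw [show b1 = marksPos b1 board.length from hpn.symm]
    apply revB_sim b1 board.length false 0 (by omega)
    · rw [onesLen_zero b1 board.length (by rintro ⟨hlt, -⟩; omega), Nat.add_zero,
          List.getD_eq_default _ _ (by omega)]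
      simp
    · intro hcon; exact absurd hcon (by decide)
  rw [hA, hB, ← hlen1]
  exact marks_final b1
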